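-- pv_equiv track=rewrite | github.com/blueplanet081/cl_parse | lib/tprint.py | split_digits
-- ===== SOURCE A (Python) =====
-- from typing import Iterator, NamedTuple, List, Any, Union, TextIO
--
-- def split_digits(text: str) -> List[str]:
--     ''' 書式文字列を、単独文字、数字列のリストに分解する。
--         ex) "=^320" -> ["=", "^", "320"]
--     '''
--     ret: List[str] = []
--     for c in (_itext := iter(text)):
--         _digits = ""
--         while c.isdigit():
--             _digits += c
--             c = next(_itext, "")
--         if _digits:
--             ret.append(_digits)
--         if c:
--             ret.append(c)
--     return ret
-- ===== SOURCE B (Python) =====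
-- def split_digits(text):
--     # groupby-style: first partition into maximal runs of equal digit-ness, then shape output per group
--     n = len(text)
--     groups = []
--     i = 0
--     while i < n:
--         k = text[i].isdigit()
--         j = i + 1
--         while j < n and text[j].isdigit() == k:
--             j += 1
--         groups.append((k, text[i:j]))
--         i = j
--     ret = []
--     for k, run in groups:
--         if k:
--             ret.append(run)
--         else:
--             ret.extend(run)
--     return ret
-- ===== Notes on version B (the rewrite author's own statement) =====
-- stated objective: alternative
-- what changed: Replaced the flat char-iterator loop that accumulates digits one character at a time with a two-phase groupby: an index two-pointer scan first slices the string into maximal runs of equal digit-ness, then a second pass emits digit runs whole and non-digit runs character by character.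
import Mathlib
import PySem

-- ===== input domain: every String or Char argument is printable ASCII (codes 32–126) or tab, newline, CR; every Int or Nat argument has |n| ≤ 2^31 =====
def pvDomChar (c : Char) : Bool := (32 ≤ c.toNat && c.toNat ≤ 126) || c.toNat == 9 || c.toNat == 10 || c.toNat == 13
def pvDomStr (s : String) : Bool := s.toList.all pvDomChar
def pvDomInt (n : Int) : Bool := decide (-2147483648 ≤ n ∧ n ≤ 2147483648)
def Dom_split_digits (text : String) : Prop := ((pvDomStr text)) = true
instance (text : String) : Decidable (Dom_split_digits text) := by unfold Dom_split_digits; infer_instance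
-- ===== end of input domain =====

-- B changes the algorithm shape (groupby two-phase scan vs flat iterator loop); return values are proved identical.
-- ===== PORT A =====
-- A: for c in iter(text): inner while consumes a digit run char by char, then appends run and the stopping char.
mutual
def pvALoop : List Char → List String
  | [] => []
  | c :: rest => pvAStep c rest []
termination_by cs => (cs.length, 1)
def pvAStep (c : Char) (rest : List Char) (digits : List Char) : List String :=
  if PySem.Chars.isdigit c then
    match rest with
    | [] =>
        -- iterator exhausted: c = next(it, "") is "", so only the digit run is appended
        (if digits ++ [c] ≠ [] then [String.ofList (digits ++ [c])] else [])
    | c2 :: rest2 => pvAStep c2 rest2 (digits ++ [c])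
  else
    (if digits ≠ [] then [String.ofList digits] else []) ++ [String.ofList [c]] ++ pvALoop rest
termination_by (rest.length + 1, 0)
end

def split_digits (text : String) : List String := pvALoop text.toList

-- ===== PORT B =====
-- inner while: j += 1 while j < n and text[j].isdigit() == k
def pvBRun (cs : List Char) (k : Bool) (j : Nat) : Nat :=
  if h : j < cs.length then
    if PySem.Chars.isdigit cs[j] == k then pvBRun cs k (j + 1) else j
  else j
termination_by cs.length - j

theorem pvBRun_ge (cs : List Char) (k : Bool) (j : Nat) : j ≤ pvBRun cs k j := by
  unfold pvBRun
  split
  · split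
    · have := pvBRun_ge cs k (j + 1); omega
    · exact le_refl j
  · exact le_refl j
termination_by cs.length - j

-- outer while: collect (k, text[i:j]) groups
def pvBGroups (cs : List Char) (i : Nat) : List (Bool × List Char) :=
  if h : i < cs.length then
    (PySem.Chars.isdigit cs[i],
      (cs.drop i).take (pvBRun cs (PySem.Chars.isdigit cs[i]) (i + 1) - i)) ::
      pvBGroups cs (pvBRun cs (PySem.Chars.isdigit cs[i]) (i + 1))
  else []
termination_by cs.length - i
decreasing_by have := pvBRun_ge cs (PySem.Chars.isdigit cs[i]) (i + 1); omega

def split_digits_alt (text : String) : List String :=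
  (pvBGroups text.toList 0).foldl
    (fun ret g => if g.1 then ret ++ [String.ofList g.2] else ret ++ g.2.map (fun ch => String.ofList [ch])) []

-- ===== PRECONDITION & SPEC =====
def Spec_split_digits (text : String) (out : List String) : Prop := out = split_digits_alt text
instance (text : String) (out : List String) : Decidable (Spec_split_digits text out) := by unfold Spec_split_digits; infer_instance

-- ===== CLAIM (what is proved, stated in full; the proofs are below) =====
def Claim_equal_split_digits : Prop := ∀ (text : String), Dom_split_digits text → Spec_split_digits text (split_digits text)

-- ===== LEMMAS AND PROOFS =====

-- list-level view of B's grouping scan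
def pvGroups : List Char → List (Bool × List Char)
  | [] => []
  | c :: rest =>
    (PySem.Chars.isdigit c,
      c :: rest.takeWhile (fun x => PySem.Chars.isdigit x == PySem.Chars.isdigit c)) ::
      pvGroups (rest.dropWhile (fun x => PySem.Chars.isdigit x == PySem.Chars.isdigit c))
termination_by cs => cs.length
decreasing_by simpa [Nat.lt_succ_iff] using List.length_dropWhile_le _ _

def pvEmit (gs : List (Bool × List Char)) : List String :=
  gs.flatMap (fun g => if g.1 then [String.ofList g.2] else g.2.map (fun ch => String.ofList [ch]))

theorem pvBRun_eq (cs : List Char) (k : Bool) (j : Nat) :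
    pvBRun cs k j = j + ((cs.drop j).takeWhile (fun x => PySem.Chars.isdigit x == k)).length := by
  unfold pvBRun
  split
  · rename_i h
    split
    · rename_i hk
      rw [pvBRun_eq cs k (j + 1), List.drop_eq_getElem_cons h, List.takeWhile_cons, if_pos hk]
      simp; omega
    · rename_i hk
      rw [List.drop_eq_getElem_cons h, List.takeWhile_cons, if_neg hk]
      simp
  · rename_i h
    rw [List.drop_eq_nil_of_le (by omega)]
    simp
termination_by cs.length - j

theorem pvDropWhile_drop {α : Type} (l : List α) (p : α → Bool) :
    l.dropWhile p = l.drop (l.takeWhile p).length := by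
  rw [show l.drop (l.takeWhile p).length
        = (l.takeWhile p ++ l.dropWhile p).drop (l.takeWhile p).length from by
      rw [List.takeWhile_append_dropWhile], List.drop_left]

theorem pvBGroups_eq (cs : List Char) (i : Nat) :
    pvBGroups cs i = pvGroups (cs.drop i) := by
  unfold pvBGroups
  split
  · rename_i h
    rw [pvBGroups_eq cs (pvBRun cs (PySem.Chars.isdigit cs[i]) (i + 1))]
    rw [pvBRun_eq cs (PySem.Chars.isdigit cs[i]) (i + 1)]
    rw [List.drop_eq_getElem_cons h, pvGroups]
    have hlen : ((cs.drop (i + 1)).takeWhile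
        (fun x => PySem.Chars.isdigit x == PySem.Chars.isdigit cs[i])).length ≤ (cs.drop (i + 1)).length :=
      (List.takeWhile_prefix _).length_le
    congr 1
    · congr 1
      rw [Nat.add_assoc, Nat.add_comm i, Nat.add_sub_cancel, Nat.add_comm 1, List.take_succ_cons]
      congr 1
      exact (List.prefix_iff_eq_take.mp (List.takeWhile_prefix _)).symm
    · rw [← List.drop_drop, ← pvDropWhile_drop]
  · rename_i h
    rw [List.drop_eq_nil_of_le (by omega), pvGroups]
termination_by cs.length - i
decreasing_by have := pvBRun_ge cs (PySem.Chars.isdigit cs[i]) (i + 1); omega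

theorem pvGroups_cons (c : Char) (rest : List Char) :
    pvGroups (c :: rest) =
      (PySem.Chars.isdigit c,
        c :: rest.takeWhile (fun x => PySem.Chars.isdigit x == PySem.Chars.isdigit c)) ::
        pvGroups (rest.dropWhile (fun x => PySem.Chars.isdigit x == PySem.Chars.isdigit c)) := by
  rw [pvGroups]

theorem pvAStep_nondigit (c : Char) (rest : List Char) (digits : List Char)
    (h : PySem.Chars.isdigit c = false) :
    pvAStep c rest digits =
      (if digits ≠ [] then [String.ofList digits] else []) ++ [String.ofList [c]] ++ pvALoop rest := by
  cases rest <;> rw [pvAStep] <;> simp [h]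

def pvTail : List Char → List String
  | [] => []
  | c2 :: r2 => String.ofList [c2] :: pvALoop r2

theorem pvEmit_cons (g : Bool × List Char) (gs : List (Bool × List Char)) :
    pvEmit (g :: gs) =
      (if g.1 then [String.ofList g.2] else g.2.map (fun ch => String.ofList [ch])) ++ pvEmit gs := by
  simp [pvEmit]

theorem pvStep_digit (c : Char) (rest : List Char) (digits : List Char)
    (h : PySem.Chars.isdigit c = true) :
    pvAStep c rest digits =
      String.ofList (digits ++ c :: rest.takeWhile (fun x => PySem.Chars.isdigit x)) ::
        pvTail (rest.dropWhile (fun x => PySem.Chars.isdigit x)) := by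
  induction rest generalizing c digits with
  | nil =>
    rw [pvAStep]
    simp [h, List.takeWhile, List.dropWhile, pvTail]
  | cons c2 rest2 ih =>
    rw [pvAStep.eq_def]
    simp only [h, if_true]
    by_cases h2 : PySem.Chars.isdigit c2 = true
    · rw [ih c2 (digits ++ [c]) h2]
      simp [h2]
    · have h2' : PySem.Chars.isdigit c2 = false := Bool.eq_false_iff.mpr h2
      rw [pvAStep_nondigit c2 rest2 (digits ++ [c]) h2']
      simp [h2', pvTail]

theorem pvEmit_nondigit (c : Char) (rest : List Char) (h : PySem.Chars.isdigit c = false) :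
    pvEmit (pvGroups (c :: rest)) = String.ofList [c] :: pvEmit (pvGroups rest) := by
  cases rest with
  | nil => simp [pvGroups, pvEmit, h, List.takeWhile, List.dropWhile]
  | cons d rs =>
    rw [pvGroups_cons]
    by_cases hd : PySem.Chars.isdigit d = true
    · simp [pvEmit, h, hd]
    · have hd' : PySem.Chars.isdigit d = false := Bool.eq_false_iff.mpr hd
      rw [pvGroups_cons d rs]
      simp [pvEmit, h, hd']

theorem pvMain : ∀ (n : Nat) (cs : List Char), cs.length ≤ n → pvALoop cs = pvEmit (pvGroups cs) := by
  intro n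
  induction n with
  | zero =>
    intro cs hl
    have : cs = [] := List.length_eq_zero_iff.mp (by omega)
    subst this
    simp [pvALoop, pvGroups, pvEmit]
  | succ n ih =>
    intro cs hl
    cases cs with
    | nil => simp [pvALoop, pvGroups, pvEmit]
    | cons c rest =>
      rw [pvALoop]
      by_cases h : PySem.Chars.isdigit c = true
      · rw [pvStep_digit c rest [] h, pvGroups_cons, pvEmit_cons]
        simp only [h, beq_true, List.nil_append, List.singleton_append, if_true]
        congr 1
        cases hdw : rest.dropWhile (fun x => PySem.Chars.isdigit x) with
        | nil => simp [pvTail, pvGroups, pvEmit]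
        | cons c2 r2 =>
          rw [pvTail]
          have hhead := List.head_dropWhile_not (p := fun x => PySem.Chars.isdigit x)
            (l := rest) (by rw [hdw]; simp)
          have hc2 : PySem.Chars.isdigit c2 = false := by simpa [hdw] using hhead
          have hr2 : r2.length ≤ n := by
            have h1 : (rest.dropWhile (fun x => PySem.Chars.isdigit x)).length ≤ rest.length :=
              (List.dropWhile_suffix _).length_le
            rw [hdw] at h1
            simp at h1 hl
            omega
          rw [pvEmit_nondigit c2 r2 hc2, ← ih r2 hr2]
      · have hb : PySem.Chars.isdigit c = false := Bool.eq_false_iff.mpr h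
        rw [pvAStep_nondigit c rest [] hb]
        rw [pvEmit_nondigit c rest hb, ih rest (by simp at hl; omega)]
        simp

-- ===== VERDICT (by name: the statement is the Claim_ definition above) =====
theorem split_digits_spec : Claim_equal_split_digits := by
  intro text _
  unfold Spec_split_digits split_digits split_digits_alt
  rw [pvBGroups_eq, List.drop_zero, pvMain text.toList.length text.toList le_rfl]
  unfold pvEmit
  rw [show (fun (ret : List String) (g : Bool × List Char) =>
        if g.1 then ret ++ [String.ofList g.2] else ret ++ g.2.map (fun ch => String.ofList [ch]))
      = (fun ret g => ret ++ (if g.1 then [String.ofList g.2]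
          else g.2.map (fun ch => String.ofList [ch]))) from by
    funext ret g; split <;> rfl]
  rw [PySem.List.foldl_append_eq_flatMap]
  simp
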